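-- pv_equiv track=rewrite | github.com/gheytuli-k/Optimization-for-Data-Science-Assignment | Old/disjoint_cycles.py | find_disjoint_cycles
-- ===== SOURCE A (Python) =====
-- def find_disjoint_cycles(graph: dict[str, dict[str, int]], n: int) -> list[list[str]]:
--     """
--     Find all the disjoint cycles of length n in the graph
--     :param graph: adjacency list representation of graph
--         - key: node
--         - value: Dictionary of neighbors and the weight of the edge
--             - key: neighbor
--             - value: weight
--     :param n: length of cycles
--     :return: list of disjoint cycles
--     """
--     # Set to track nodes used in disjoint cycles
--     used_nodes = set()
--     disjoint_cycles = []
--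
--     def dfs(node, start, depth, visited, path):
--         if depth == n:
--             if start in graph[node]:
--                 # Check if the cycles is disjoint
--                 if all(p not in used_nodes for p in path):
--                     disjoint_cycles.append(path + [start])
--                     used_nodes.update(path)  # Mark these nodes as used
--
--             return
--
--         visited.add(node)
--
--         for neighbor in graph[node]:
--             if neighbor not in visited and neighbor not in used_nodes:
--                 dfs(neighbor, start, depth + 1, visited, path + [neighbor])
--
--         visited.remove(node)
--
--     for node in graph:
--         dfs(node, node, 1, set(), [node])
--
--     return disjoint_cycles
-- ===== SOURCE B (Python) =====
-- def find_disjoint_cycles(graph: dict[str, dict[str, int]], n: int) -> list[list[str]]: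
--     """
--     Two-phase rewrite: first enumerate every closed simple path of length n in
--     DFS order (no used-node pruning: a path through a used node would fail the
--     greedy check anyway), then take the candidates greedily in that order.
--     """
--     def closed_paths(start, node, visited, path, depth):
--         if depth == n:
--             return [path] if start in graph[node] else []
--         nv = visited | {node}
--         return [q for nb in graph[node] if nb not in nv
--                   for q in closed_paths(start, nb, nv, path + [nb], depth + 1)]
--
--     candidates = [(start, path) for start in graph
--                   for path in closed_paths(start, start, set(), [start], 1)]
--     used = set()
--     cycles = []
--     for start, path in candidates:
--         if all(p not in used for p in path):
--             cycles.append(path + [start])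
--             used.update(path)
--     return cycles
-- ===== Notes on version B (the rewrite author's own statement) =====
-- stated objective: alternative
-- what changed: A interleaves a mutating greedy selection inside a recursive DFS (pruning on used_nodes mid-search); B is a two-phase decomposition: enumerate all closed simple paths of length n per start in DFS order as pure data (no used-node pruning), then a single greedy fold picks disjoint ones.
import Mathlib
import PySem

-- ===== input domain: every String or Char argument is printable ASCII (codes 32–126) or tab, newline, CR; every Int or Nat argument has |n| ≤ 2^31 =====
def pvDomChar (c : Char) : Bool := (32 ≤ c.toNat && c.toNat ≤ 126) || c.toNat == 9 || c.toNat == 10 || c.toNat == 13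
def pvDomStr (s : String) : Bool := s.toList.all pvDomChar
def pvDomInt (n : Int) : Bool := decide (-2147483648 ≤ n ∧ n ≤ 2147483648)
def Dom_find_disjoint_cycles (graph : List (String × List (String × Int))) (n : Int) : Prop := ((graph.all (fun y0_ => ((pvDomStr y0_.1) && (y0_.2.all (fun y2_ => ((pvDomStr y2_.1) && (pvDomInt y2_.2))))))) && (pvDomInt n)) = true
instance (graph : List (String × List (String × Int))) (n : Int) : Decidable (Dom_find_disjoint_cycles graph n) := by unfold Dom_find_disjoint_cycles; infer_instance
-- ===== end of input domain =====

-- B replaces A's DFS with interleaved greedy mutation by a two-phase decomposition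
-- (pure enumeration of closed simple paths, then one greedy fold); alternative, not faster.


-- Shared helpers (both Pythons evaluate `graph[node]` / its keys identically):
-- the neighbour keys of `node` = iteration order / membership of the dict graph[node].
def pvNbrs (graph : List (String × List (String × Int))) (node : String) : List String :=
  (PySem.Dict.ofList ((PySem.Dict.ofList graph).getD node [])).keys

-- Recursion fuel: a DFS chain visits pairwise-distinct names drawn from the keys and
-- neighbour entries of graph, so it is shorter than this bound (never exhausted).
def pvFuel (graph : List (String × List (String × Int))) : Nat :=
  graph.length + (graph.map (fun p => p.2.length)).sum + 1

-- ===== PORT A =====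
-- state = (used_nodes, disjoint_cycles); `visited` is passed as visited∪{node} to the
-- children, which is what Python's add-before/remove-after mutation amounts to.
def pvDfsA (graph : List (String × List (String × Int))) (n : Int) :
    Nat → String → String → Int → PySem.Set String → List String →
    PySem.Set String × List (List String) → PySem.Set String × List (List String)
  | 0, _, _, _, _, _, s => s
  | fuel + 1, node, start, depth, visited, path, s =>
    if depth = n then
      if (pvNbrs graph node).contains start then
        if path.all (fun p => !(PySem.Set.contains s.1 p)) then
          (PySem.Set.update s.1 path, s.2 ++ [path ++ [start]])
        else s
      else s
    else
      let visited' := PySem.Set.add visited node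
      (pvNbrs graph node).foldl
        (fun s' nb =>
          if !(PySem.Set.contains visited' nb) && !(PySem.Set.contains s'.1 nb) then
            pvDfsA graph n fuel nb start (depth + 1) visited' (path ++ [nb]) s'
          else s') s

def find_disjoint_cycles (graph : List (String × List (String × Int))) (n : Int) : List (List String) :=
  ((PySem.Dict.ofList graph).keys.foldl
      (fun s node => pvDfsA graph n (pvFuel graph) node node 1 PySem.Set.empty [node] s)
      (PySem.Set.empty, [])).2

-- ===== PORT B =====
-- closed_paths: all simple paths [start, …] of length n whose last node links back to start.
def pvGenB (graph : List (String × List (String × Int))) (n : Int) :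
    Nat → String → String → Int → PySem.Set String → List String → List (List String)
  | 0, _, _, _, _, _ => []
  | fuel + 1, start, node, depth, visited, path =>
    if depth = n then
      if (pvNbrs graph node).contains start then [path] else []
    else
      let nv := PySem.Set.add visited node
      (pvNbrs graph node).flatMap (fun nb =>
        if !(PySem.Set.contains nv nb) then
          pvGenB graph n fuel start nb (depth + 1) nv (path ++ [nb])
        else [])

-- the greedy pass over the candidate list: state = (used, cycles).
def pvGreedyStep (s : PySem.Set String × List (List String)) (c : String × List String) :
    PySem.Set String × List (List String) :=
  if c.2.all (fun p => !(PySem.Set.contains s.1 p)) then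
    (PySem.Set.update s.1 c.2, s.2 ++ [c.2 ++ [c.1]])
  else s

def find_disjoint_cycles_alt (graph : List (String × List (String × Int))) (n : Int) : List (List String) :=
  let candidates := (PySem.Dict.ofList graph).keys.flatMap (fun start =>
    (pvGenB graph n (pvFuel graph) start start 1 PySem.Set.empty [start]).map (fun p => (start, p)))
  (candidates.foldl pvGreedyStep (PySem.Set.empty, [])).2

-- ===== PRECONDITION & SPEC =====
-- Pre_ excludes graphs (when n ≠ 1) having some adjacency entry whose neighbour is not a
-- key of graph: on those A raises KeyError as soon as the DFS traverses such a neighbour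
-- (with n = 1 no neighbour is ever traversed, so those inputs stay inside).
def Pre_find_disjoint_cycles (graph : List (String × List (String × Int))) (n : Int) : Prop :=
  n = 1 ∨ graph.all (fun p => p.2.all (fun q => (graph.map Prod.fst).contains q.1)) = true

instance (graph : List (String × List (String × Int))) (n : Int) : Decidable (Pre_find_disjoint_cycles graph n) := by unfold Pre_find_disjoint_cycles; infer_instance

def pvWitness_find_disjoint_cycles : (List (String × List (String × Int))) × Int :=
  ([("a", [("b", 1)]), ("b", [("a", 1)])], 2)

def Spec_find_disjoint_cycles (graph : List (String × List (String × Int))) (n : Int) (out : List (List String)) : Prop := out = find_disjoint_cycles_alt graph n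
instance (graph : List (String × List (String × Int))) (n : Int) (out : List (List String)) : Decidable (Spec_find_disjoint_cycles graph n out) := by unfold Spec_find_disjoint_cycles; infer_instance

-- ===== CLAIM (what is proved, stated in full; the proofs are below) =====
def Claim_equal_find_disjoint_cycles : Prop := ∀ (graph : List (String × List (String × Int))) (n : Int), Dom_find_disjoint_cycles graph n → Pre_find_disjoint_cycles graph n → Spec_find_disjoint_cycles graph n (find_disjoint_cycles graph n)

-- ===== LEMMAS AND PROOFS =====

-- Candidates all containing an already-used node are all rejected by the greedy fold.
theorem pvGreedy_skip (l : List (String × List String))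
    (s : PySem.Set String × List (List String)) (x : String) (hx : x ∈ s.1)
    (hall : ∀ c ∈ l, x ∈ c.2) : l.foldl pvGreedyStep s = s := by
  induction l generalizing s with
  | nil => rfl
  | cons c l ih =>
    have hstep : pvGreedyStep s c = s := by
      unfold pvGreedyStep
      have : ¬ (c.2.all (fun p => !(PySem.Set.contains s.1 p)) = true) := by
        simp only [List.all_eq_true, Bool.not_eq_true']
        intro h
        have hc := h x (hall c (List.mem_cons_self))
        rw [(PySem.Set.contains_iff s.1 x).mpr hx] at hc
        exact absurd hc (by simp)
      exact if_neg this
    simp only [List.foldl_cons, hstep]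
    exact ih s hx (fun d hd => hall d (List.mem_cons_of_mem c hd))

-- Every generated path extends the current path.
theorem pvGenB_path_mem (graph : List (String × List (String × Int))) (n : Int) :
    ∀ (fuel : Nat) (start node : String) (depth : Int) (visited : PySem.Set String)
      (path q : List String), q ∈ pvGenB graph n fuel start node depth visited path →
      ∀ x ∈ path, x ∈ q := by
  intro fuel
  induction fuel with
  | zero => intro start node depth visited path q hq; simp [pvGenB] at hq
  | succ fuel ih =>
    intro start node depth visited path q hq x hx
    unfold pvGenB at hq
    by_cases hd : depth = n
    · rw [if_pos hd] at hq
      split at hq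
      · rw [List.mem_singleton] at hq; subst hq; exact hx
      · exact absurd hq (List.not_mem_nil)
    · rw [if_neg hd] at hq
      simp only [List.mem_flatMap] at hq
      obtain ⟨nb, _, hq⟩ := hq
      split at hq
      · exact ih start nb (depth + 1) _ (path ++ [nb]) q hq x (List.mem_append_left _ hx)
      · exact absurd hq (List.not_mem_nil)

-- Core: A's DFS from any frame equals the greedy fold over B's generated candidates.
theorem pvDfsA_eq_greedy (graph : List (String × List (String × Int))) (n : Int) :
    ∀ (fuel : Nat) (node start : String) (depth : Int) (visited : PySem.Set String)
      (path : List String) (s : PySem.Set String × List (List String)),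
      pvDfsA graph n fuel node start depth visited path s =
        ((pvGenB graph n fuel start node depth visited path).map
          (fun p => (start, p))).foldl pvGreedyStep s := by
  intro fuel
  induction fuel with
  | zero => intro node start depth visited path s; simp [pvDfsA, pvGenB]
  | succ fuel ih =>
    intro node start depth visited path s
    unfold pvDfsA pvGenB
    by_cases hd : depth = n
    · rw [if_pos hd, if_pos hd]
      split
      · simp only [List.map_cons, List.map_nil, List.foldl_cons, List.foldl_nil]
        unfold pvGreedyStep
        rfl
      · simp
    · rw [if_neg hd, if_neg hd]
      have inner : ∀ (nbs : List String) (s' : PySem.Set String × List (List String)),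
          nbs.foldl
            (fun s' nb =>
              if !(PySem.Set.contains (PySem.Set.add visited node) nb)
                  && !(PySem.Set.contains s'.1 nb) then
                pvDfsA graph n fuel nb start (depth + 1) (PySem.Set.add visited node)
                  (path ++ [nb]) s'
              else s') s'
          = ((nbs.flatMap (fun nb =>
              if !(PySem.Set.contains (PySem.Set.add visited node) nb) then
                pvGenB graph n fuel start nb (depth + 1) (PySem.Set.add visited node)
                  (path ++ [nb])
              else [])).map (fun p => (start, p))).foldl pvGreedyStep s' := by
        intro nbs
        induction nbs with
        | nil => intro s'; rfl
        | cons nb nbs ihn =>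
          intro s'
          simp only [List.foldl_cons, List.flatMap_cons, List.map_append, List.foldl_append]
          by_cases hvm : nb ∈ visited ∨ nb = node
          · rw [if_neg (by simp [PySem.Set.mem_add]; tauto),
                if_neg (by simp [PySem.Set.mem_add]; tauto)]
            simp only [List.map_nil, List.foldl_nil]
            exact ihn s'
          · by_cases hum : nb ∈ s'.1
            · rw [if_neg (by simp [PySem.Set.mem_add]; tauto),
                  if_pos (by simp [PySem.Set.mem_add]; tauto)]
              have hskip :
                  ((pvGenB graph n fuel start nb (depth + 1) (PySem.Set.add visited node)
                    (path ++ [nb])).map (fun p => (start, p))).foldl pvGreedyStep s' = s' := by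
                apply pvGreedy_skip _ _ nb hum
                intro c hc
                simp only [List.mem_map] at hc
                obtain ⟨q, hq, hcq⟩ := hc
                subst hcq
                exact pvGenB_path_mem graph n fuel start nb (depth + 1) _ (path ++ [nb]) q hq
                  nb (List.mem_append_right _ (List.mem_singleton.mpr rfl))
              rw [hskip]
              exact ihn s'
            · rw [if_pos (by simp [PySem.Set.mem_add]; tauto),
                  if_pos (by simp [PySem.Set.mem_add]; tauto)]
              rw [ih nb start (depth + 1) (PySem.Set.add visited node) (path ++ [nb]) s']
              exact ihn _
      exact inner (pvNbrs graph node) s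

-- Top level: fold of DFS over the start nodes equals the greedy fold over all candidates.
theorem pvTop_eq (graph : List (String × List (String × Int))) (n : Int) :
    ∀ (ks : List String) (s : PySem.Set String × List (List String)),
      ks.foldl (fun s node => pvDfsA graph n (pvFuel graph) node node 1 PySem.Set.empty [node] s) s
        = ((ks.flatMap (fun start =>
            (pvGenB graph n (pvFuel graph) start start 1 PySem.Set.empty [start]).map
              (fun p => (start, p)))).foldl pvGreedyStep s) := by
  intro ks
  induction ks with
  | nil => intro s; rfl
  | cons k ks ih =>
    intro s
    simp only [List.foldl_cons, List.flatMap_cons, List.foldl_append]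
    rw [pvDfsA_eq_greedy]
    exact ih _

-- ===== VERDICT (by name: the statement is the Claim_ definition above) =====
theorem find_disjoint_cycles_spec : Claim_equal_find_disjoint_cycles := by
  intro graph n _ _
  unfold Spec_find_disjoint_cycles find_disjoint_cycles find_disjoint_cycles_alt
  rw [pvTop_eq]
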